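-- pv_equiv track=rewrite | github.com/zoumotu-root/git_test | circular list/calc_circular_list.py | cal_NX
-- ===== SOURCE A (Python) =====
-- def cal_NX(l):
--     """
--     題意のN(X)を計算する。N(X)：全部分リストの和の集合
--     重複が現れた場合は題意にそぐわないのでリターン
--     下記の例はL=3 の時の正解の例
--     >>> cal_NX([1, 2, 4])
--     {1, 2, 3, 4, 5, 6, 7}
--     """
--     N_X = set()
--     for sum_range in range(1, len(l)):
--     #足算を行う範囲を決める
--         for i in range(len(l)):
--         #足算を行う回数を制御
--             subset_sum = sum(l[:sum_range])
--             #要素が重複してあらわれた場合は題意を満たすN（X）を生成できないのでこれ以上計算を行わない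
--             if subset_sum in N_X:
--                 return N_X
--             N_X.add(subset_sum)
--             l = rotate(l)
--             #リストをローテンションさせる
--     N_X.add(sum(l))
--     return N_X
--
-- def rotate(l):
--     """
--     リストをローテーションさせる。
--     >>> rotate([1,2,3,4,5])
--     [2, 3, 4, 5, 1]
--     """
--     return l[1:]+l[:1]
-- ===== SOURCE B (Python) =====
-- def cal_NX(l):
--     """Same result as A: set of sums of circular windows (lengths 1..len(l)-1,
--     in the same visiting order, early return on first duplicate), plus sum(l).
--     Uses prefix sums over the doubled list so each window sum is O(1)."""
--     n = len(l)
--     pre = [0]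
--     total = 0
--     for x in l + l:
--         total += x
--         pre.append(total)
--     seen = set()
--     for k in range(1, n):
--         for a, b in zip(pre[:n], pre[k:]):
--             s = b - a
--             if s in seen:
--                 return seen
--             seen.add(s)
--     seen.add(pre[n])
--     return seen
-- ===== Notes on version B (the rewrite author's own statement) =====
-- stated objective: faster
-- what changed: A re-sums each rotated prefix from scratch (sum(l[:k]) on a freshly rotated copy for every window), B builds one prefix-sum array over the doubled list and obtains every window sum as a difference of two prefix sums, visiting the same sums in the same order with the same duplicate early-exit.
import Mathlib
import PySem

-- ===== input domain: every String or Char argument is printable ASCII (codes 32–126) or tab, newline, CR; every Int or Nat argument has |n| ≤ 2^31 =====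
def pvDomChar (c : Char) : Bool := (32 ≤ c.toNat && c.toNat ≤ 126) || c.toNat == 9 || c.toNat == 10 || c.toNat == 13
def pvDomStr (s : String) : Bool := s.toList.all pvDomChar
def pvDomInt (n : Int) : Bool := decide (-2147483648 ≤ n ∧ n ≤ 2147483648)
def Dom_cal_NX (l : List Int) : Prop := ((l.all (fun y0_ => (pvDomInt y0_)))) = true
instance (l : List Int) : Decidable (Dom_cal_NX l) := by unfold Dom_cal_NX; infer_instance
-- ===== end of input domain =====

-- B replaces A's O(n^3) re-summation of each rotated prefix by prefix sums over the
-- doubled list, visiting the same window sums in the same order with the same early exit.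

-- ===== PORT A =====
-- rotate(l) = l[1:] + l[:1]
def pvRotate (l : List Int) : List Int :=
  PySem.List.slice l (some 1) none ++ PySem.List.slice l none (some 1)

-- inner 'for i in range(len(l))' loop: state (list, set); Bool = early return happened
def pvAInner (k : Int) : List Int → List Int → PySem.Set Int → Bool × List Int × PySem.Set Int
  | [], l, s => (false, l, s)
  | _ :: is, l, s =>
      let ss := (PySem.List.slice l none (some k)).sum
      if PySem.Set.contains s ss then (true, l, s)
      else pvAInner k is (pvRotate l) (PySem.Set.add s ss)

-- outer 'for sum_range in range(1, len(l))' loop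
def pvAOuter : List Int → List Int → PySem.Set Int → Bool × List Int × PySem.Set Int
  | [], l, s => (false, l, s)
  | k :: ks, l, s =>
      match pvAInner k (PySem.List.pyRange 0 (l.length : Int) 1) l s with
      | (true, l', s') => (true, l', s')
      | (false, l', s') => pvAOuter ks l' s'

def cal_NX (l : List Int) : List Int :=
  match pvAOuter (PySem.List.pyRange 1 (l.length : Int) 1) l PySem.Set.empty with
  | (true, _, s) => s
  | (false, l', s) => PySem.Set.add s l'.sum

-- ===== PORT B =====
-- 'for x in l+l: total += x; pre.append(total)'
def pvBuildPre : List Int → Int → List Int → List Int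
  | [], _, pre => pre
  | x :: xs, total, pre => pvBuildPre xs (total + x) (pre ++ [total + x])

-- inner 'for a, b in zip(pre[:n], pre[k:])' loop
def pvBInner : List (Int × Int) → PySem.Set Int → Bool × PySem.Set Int
  | [], s => (false, s)
  | (a, b) :: ps, s =>
      let x := b - a
      if PySem.Set.contains s x then (true, s) else pvBInner ps (PySem.Set.add s x)

-- outer 'for k in range(1, n)' loop
def pvBOuter (pre : List Int) (n : Int) : List Int → PySem.Set Int → Bool × PySem.Set Int
  | [], s => (false, s)
  | k :: ks, s =>
      match pvBInner ((PySem.List.slice pre none (some n)).zip (PySem.List.slice pre (some k) none)) s with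
      | (true, s') => (true, s')
      | (false, s') => pvBOuter pre n ks s'

def cal_NX_alt (l : List Int) : List Int :=
  let n : Int := (l.length : Int)
  let pre := pvBuildPre (l ++ l) 0 [0]
  match pvBOuter pre n (PySem.List.pyRange 1 n 1) PySem.Set.empty with
  | (true, s) => s
  -- pre[n] is always in range (len(pre) = 2*len(l)+1), so pyGetD is exact here
  | (false, s) => PySem.Set.add s (PySem.List.pyGetD pre n 0)

-- ===== PRECONDITION & SPEC =====
def Spec_cal_NX (l : List Int) (out : List Int) : Prop := out = cal_NX_alt l
instance (l : List Int) (out : List Int) : Decidable (Spec_cal_NX l out) := by unfold Spec_cal_NX; infer_instance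

-- ===== CLAIM (what is proved, stated in full; the proofs are below) =====
def Claim_equal_cal_NX : Prop := ∀ (l : List Int), Dom_cal_NX l → Spec_cal_NX l (cal_NX l)

-- ===== LEMMAS AND PROOFS =====

-- generic duplicate-scan both inner loops reduce to
def scanDup : List Int → PySem.Set Int → Bool × PySem.Set Int
  | [], s => (false, s)
  | x :: xs, s => if PySem.Set.contains s x then (true, s) else scanDup xs (PySem.Set.add s x)

-- the window sums visited for a given window length k, starting offsets i, i+1, …, i+j-1
def winSums (l : List Int) (k : Nat) (i j : Nat) : List Int :=
  (List.range j).map (fun m => ((((l ++ l).drop (i + m)).take k).sum))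

lemma winSums_cons (l : List Int) (k i j : Nat) :
    winSums l k i (j + 1) = (((l ++ l).drop i).take k).sum :: winSums l k (i + 1) j := by
  simp [winSums, List.range_succ_eq_map, List.map_map, Function.comp_def, Nat.add_comm, Nat.add_left_comm]

lemma bInner_eq_scanDup (ps : List (Int × Int)) (s : PySem.Set Int) :
    pvBInner ps s = scanDup (ps.map (fun p => p.2 - p.1)) s := by
  induction ps generalizing s with
  | nil => rfl
  | cons p ps ih => cases p; simp [pvBInner, scanDup, ih]

lemma rotate_state (l : List Int) (i : Nat) (hi : i < l.length) :
    pvRotate (l.drop i ++ l.take i) = l.drop (i + 1) ++ l.take (i + 1) := by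
  rw [pvRotate, PySem.List.slice_from_one, PySem.List.slice_to _ (by omega)]
  show (l.drop i ++ l.take i).tail ++ (l.drop i ++ l.take i).take 1 = _
  rw [List.drop_eq_getElem_cons hi, List.cons_append, List.tail_cons, List.take_succ_cons,
    List.take_zero, List.append_assoc, List.take_append_getElem hi]

lemma take_doubled (l : List Int) (i k : Nat) (hi : i ≤ l.length) (hk : k ≤ l.length) :
    ((l ++ l).drop i).take k = (l.drop i ++ l.take i).take k := by
  rw [List.drop_append_of_le_length hi,
    show l.drop i ++ l = (l.drop i ++ l.take i) ++ l.drop i from by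
      rw [List.append_assoc, List.take_append_drop],
    List.take_append_of_le_length (by simp; omega)]

lemma aInner_eq_scanDup (l : List Int) (k : Nat) (hk : k ≤ l.length) :
    ∀ (is : List Int) (i : Nat) (s : PySem.Set Int), i + is.length ≤ l.length →
    ∃ lmid,
      pvAInner (k : Int) is (l.drop i ++ l.take i) s =
        ((scanDup (winSums l k i is.length) s).1, lmid, (scanDup (winSums l k i is.length) s).2) ∧
      ((scanDup (winSums l k i is.length) s).1 = false →
        lmid = l.drop (i + is.length) ++ l.take (i + is.length)) := by
  intro is
  induction is with
  | nil =>
    intro i s _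
    exact ⟨l.drop i ++ l.take i, by simp [pvAInner, winSums, scanDup], by simp⟩
  | cons c is ih =>
    intro i s hlen
    simp only [List.length_cons] at hlen ⊢
    have hi : i < l.length := by omega
    rw [winSums_cons]
    have hss : (PySem.List.slice (l.drop i ++ l.take i) none (some (k : Int))).sum
        = (((l ++ l).drop i).take k).sum := by
      rw [PySem.List.slice_to _ (by omega), Int.toNat_natCast, take_doubled l i k (by omega) hk]
    simp only [pvAInner, scanDup, hss]
    by_cases hc : PySem.Set.contains s ((((l ++ l).drop i).take k).sum) = true
    · rw [if_pos hc, if_pos hc]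
      exact ⟨l.drop i ++ l.take i, rfl, by simp⟩
    · rw [if_neg hc, if_neg hc, rotate_state l i hi]
      obtain ⟨lmid, h1, h2⟩ := ih (i + 1) (PySem.Set.add s ((((l ++ l).drop i).take k).sum)) (by omega)
      refine ⟨lmid, h1, fun hf => ?_⟩
      rw [h2 hf, show i + 1 + is.length = i + (is.length + 1) from by omega]

lemma buildPre_eq (xs : List Int) : ∀ (t : Int) (acc : List Int),
    pvBuildPre xs t acc = acc ++ (List.range xs.length).map (fun i => t + (xs.take (i + 1)).sum) := by
  induction xs with
  | nil => intro t acc; simp [pvBuildPre]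
  | cons x xs ih =>
    intro t acc
    rw [pvBuildPre, ih]
    simp [List.range_succ_eq_map, List.map_map, Function.comp_def, add_assoc]

lemma pre_eq (l : List Int) :
    pvBuildPre (l ++ l) 0 [0] =
      (List.range (2 * l.length + 1)).map (fun i => ((l ++ l).take i).sum) := by
  rw [buildPre_eq]
  rw [show 2 * l.length + 1 = (l ++ l).length + 1 from by simp; omega]
  rw [List.range_succ_eq_map]
  simp [List.map_map, Function.comp_def]

lemma pre_getElem (l : List Int) (i : Nat) (hi : i < 2 * l.length + 1) :
    (pvBuildPre (l ++ l) 0 [0])[i]'(by rw [pre_eq]; simpa using hi) = ((l ++ l).take i).sum := by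
  simp [pre_eq]

lemma zip_eq_winSums (l : List Int) (k : Nat) (_hk1 : 1 ≤ k) (hk2 : k < l.length) :
    (((pvBuildPre (l ++ l) 0 [0]).take l.length).zip
        ((pvBuildPre (l ++ l) 0 [0]).drop k)).map (fun p => p.2 - p.1)
      = winSums l k 0 l.length := by
  have hlen : (pvBuildPre (l ++ l) 0 [0]).length = 2 * l.length + 1 := by
    rw [pre_eq]; simp
  apply List.ext_getElem
  · simp [hlen, winSums]; omega
  · intro m h1 h2
    have hm : m < l.length := by simpa [hlen, winSums] using h2
    simp only [List.getElem_map, List.getElem_zip, winSums, List.getElem_range]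
    rw [List.getElem_take, List.getElem_drop]
    rw [pre_getElem l m (by omega), pre_getElem l (k + m) (by omega)]
    rw [show k + m = m + k from by omega, List.take_add]
    simp

lemma outer_eq (l : List Int) :
    ∀ (ks : List Int) (s : PySem.Set Int), (∀ k ∈ ks, 1 ≤ k ∧ k < (l.length : Int)) →
    ∃ lmid,
      pvAOuter ks l s =
        ((pvBOuter (pvBuildPre (l ++ l) 0 [0]) (l.length : Int) ks s).1, lmid,
         (pvBOuter (pvBuildPre (l ++ l) 0 [0]) (l.length : Int) ks s).2) ∧
      ((pvBOuter (pvBuildPre (l ++ l) 0 [0]) (l.length : Int) ks s).1 = false → lmid = l) := by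
  intro ks
  induction ks with
  | nil => intro s _; exact ⟨l, by simp [pvAOuter, pvBOuter], by simp⟩
  | cons k ks ih =>
    intro s hks
    obtain ⟨_hk1, hk2⟩ := hks k (by simp)
    set kn := k.toNat with hkn
    have hkval : k = (kn : Int) := by omega
    have hkn2 : kn < l.length := by omega
    -- the two inner loops run the same duplicate scan
    have hA := aInner_eq_scanDup l kn (by omega) (PySem.List.pyRange 0 (l.length : Int) 1) 0 s
      (by rw [PySem.List.length_pyRange_one]; simp)
    rw [PySem.List.length_pyRange_one] at hA
    have hlen0 : ((l.length : Int) - 0).toNat = l.length := by omega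
    rw [hlen0] at hA
    obtain ⟨lmid, h1, h2⟩ := hA
    simp only [List.drop_zero, List.take_zero, List.append_nil] at h1 h2
    have hB : pvBInner (((pvBuildPre (l ++ l) 0 [0]).take l.length).zip
          ((pvBuildPre (l ++ l) 0 [0]).drop kn)) s = scanDup (winSums l kn 0 l.length) s := by
      rw [bInner_eq_scanDup, zip_eq_winSums l kn (by omega) hkn2]
    have hsliceN : PySem.List.slice (pvBuildPre (l ++ l) 0 [0]) none (some (l.length : Int))
        = (pvBuildPre (l ++ l) 0 [0]).take l.length := by
      rw [PySem.List.slice_to _ (by positivity), Int.toNat_natCast]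
    have hsliceK : PySem.List.slice (pvBuildPre (l ++ l) 0 [0]) (some k) none
        = (pvBuildPre (l ++ l) 0 [0]).drop kn := by
      rw [PySem.List.slice_from _ (by omega)]
    rw [pvAOuter, pvBOuter, hsliceN, hsliceK, hB, hkval, h1]
    rcases hsc : scanDup (winSums l kn 0 l.length) s with ⟨b, s'⟩
    rw [hsc] at h2
    cases b with
    | true => exact ⟨lmid, rfl, by simp⟩
    | false =>
      have hl : lmid = l := by
        have := h2 rfl
        simpa using this
      rw [hl]
      exact ih s' (fun k hk => hks k (by simp [hk]))

-- ===== VERDICT (by name: the statement is the Claim_ definition above) =====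
theorem cal_NX_spec : Claim_equal_cal_NX := by
  intro l _
  unfold Spec_cal_NX cal_NX cal_NX_alt
  obtain ⟨lmid, h1, h2⟩ := outer_eq l (PySem.List.pyRange 1 (l.length : Int) 1) PySem.Set.empty
    (fun k hk => by simpa using (PySem.List.mem_pyRange_one.mp hk))
  show (match pvAOuter (PySem.List.pyRange 1 (l.length : Int) 1) l PySem.Set.empty with
      | (true, _, s) => s
      | (false, l', s) => PySem.Set.add s l'.sum) =
    (match pvBOuter (pvBuildPre (l ++ l) 0 [0]) (l.length : Int)
        (PySem.List.pyRange 1 (l.length : Int) 1) PySem.Set.empty with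
      | (true, s) => s
      | (false, s) => PySem.Set.add s (PySem.List.pyGetD (pvBuildPre (l ++ l) 0 [0]) (l.length : Int) 0))
  rcases hB : pvBOuter (pvBuildPre (l ++ l) 0 [0]) (l.length : Int)
      (PySem.List.pyRange 1 (l.length : Int) 1) PySem.Set.empty with ⟨b, s2⟩
  rw [hB] at h1 h2
  simp only at h1 h2
  rw [h1]
  cases b with
  | true => rfl
  | false =>
    rw [h2 rfl]
    show PySem.Set.add s2 l.sum = PySem.Set.add s2 _
    rw [PySem.List.pyGetD_natCast]
    have hlen : (pvBuildPre (l ++ l) 0 [0]).length = 2 * l.length + 1 := by rw [pre_eq]; simp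
    rw [List.getD_eq_getElem _ _ (by omega), pre_getElem l l.length (by omega), List.take_left]
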